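-- pv_equiv track=rewrite | github.com/bharurn/mimicpy | system/_getItp.py | _cleanItp
-- ===== SOURCE A (Python) =====
-- def _cleanItp(itp, mol):
--     atoms = False
--     atomtypes = False
--     notwrite = False
--     itp_str = ""
--
--     mol_ = f"{mol}_" # MOL_ string
--
--     hvy = []
--
--     for line in itp.splitlines()[1:]:
--
--         if "[ atomtypes ]" in line:
--             atomtypes = True # start atomtypes
--         elif atomtypes:
--             if line.strip() == '': # end atomtypes
--                 atomtypes = False
--             elif not line.strip()[0] == ';': # if line is not comment
--                 splt = line.split() # split line
--                 #and stich it back together with splt[0] and splt[1], which are the atom names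
--                 #repalced by $1_atom-names
--                 line = ' '+ mol_ + splt[0] + ' '*7 + mol_ + splt[1] + line[12:]
--
--         if "[ atoms ]" in line:
--             atoms = True # start atoms
--         elif atoms:
--             if line.strip() == '' or line == '[ bonds ]':
--                 atoms = False # end atoms
--             elif not line.strip()[0] == ';' :
--                 splt = line.split()
--                 #same as above
--                 line = line[:9] + mol_ + splt[1] + line[11:]
--
--                 if 'H' not in splt[4].upper():
--                     hvy.append(splt[0])
--
--         if "[ defaults ]" in line or "[ system ]" in line or "[ molecules ]" in line:
--             notwrite = True
--
--         if notwrite and line.strip() == '': notwrite = False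
--
--         if notwrite == False:
--             itp_str += line+'\n' # collate line into itp_string
--
--     return itp_str, hvy
-- ===== SOURCE B (Python) =====
-- def _cleanItp(itp, mol):
--     mol_ = mol + "_"
--
--     # pass 1: atomtypes-section rewriting (state: inside an atomtypes block)
--     pass1 = []
--     inside = False
--     for line in itp.splitlines()[1:]:
--         if "[ atomtypes ]" in line:
--             inside = True
--         elif inside:
--             s = line.strip()
--             if s == '':
--                 inside = False
--             elif s[0] != ';':
--                 splt = line.split()
--                 line = ' ' + mol_ + splt[0] + ' ' * 7 + mol_ + splt[1] + line[12:]
--         pass1.append(line)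
--
--     # pass 2: atoms-section rewriting + heavy-atom collection
--     pass2 = []
--     hvy = []
--     inside = False
--     for line in pass1:
--         if "[ atoms ]" in line:
--             inside = True
--         elif inside:
--             s = line.strip()
--             if s == '' or line == '[ bonds ]':
--                 inside = False
--             elif s[0] != ';':
--                 splt = line.split()
--                 line = line[:9] + mol_ + splt[1] + line[11:]
--                 if 'H' not in splt[4].upper():
--                     hvy.append(splt[0])
--         pass2.append(line)
--
--     # pass 3: drop the defaults/system/molecules blocks
--     kept = []
--     skipping = False
--     for line in pass2:
--         if "[ defaults ]" in line or "[ system ]" in line or "[ molecules ]" in line: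
--             skipping = True
--         if skipping and line.strip() == '':
--             skipping = False
--         if not skipping:
--             kept.append(line)
--
--     return ''.join(l + '\n' for l in kept), hvy
-- ===== Notes on version B (the rewrite author's own statement) =====
-- stated objective: alternative
-- what changed: A's single loop that threads three section flags (atomtypes/atoms/notwrite) through one pass is split into a three-stage pipeline: an atomtypes-rewrite pass, an atoms-rewrite pass that also collects the heavy atoms, and a block-drop filter pass, with the surviving lines joined once at the end instead of string concatenation inside the loop.
import Mathlib
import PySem

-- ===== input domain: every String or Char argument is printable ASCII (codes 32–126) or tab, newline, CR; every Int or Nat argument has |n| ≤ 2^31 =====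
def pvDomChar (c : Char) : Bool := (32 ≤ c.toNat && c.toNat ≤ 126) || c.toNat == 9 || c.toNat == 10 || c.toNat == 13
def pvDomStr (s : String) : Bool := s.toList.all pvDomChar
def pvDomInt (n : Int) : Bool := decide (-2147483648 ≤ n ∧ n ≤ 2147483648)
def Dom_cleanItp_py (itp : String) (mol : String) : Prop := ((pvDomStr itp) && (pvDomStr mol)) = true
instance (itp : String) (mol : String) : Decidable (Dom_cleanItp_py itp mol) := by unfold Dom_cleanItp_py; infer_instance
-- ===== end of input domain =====

-- B replaces A's single loop over three section flags by a three-stage pipeline (atomtypes rewrite pass,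
-- atoms rewrite + heavy-atom pass, block-drop filter pass) joined once at the end; objective: alternative.

-- ===== PORT A =====
-- shared small helpers (used verbatim by both ports; each names a sub-expression of the Python)

-- line.strip() == ''
def pvBlank (l : String) : Bool := PySem.Str.strip l == ""
-- line.strip()[0] == ';'  — in both Pythons this is only evaluated after the blank test, so strip is
-- nonempty there; the 'none' case of pyGet? (Python IndexError on '') is unreachable on those paths.
def pvComment (l : String) : Bool := PySem.Str.pyGet? (PySem.Str.strip l) 0 == some ';'
-- splt[i]: Python raises IndexError out of range; Pre_ keeps those inputs out, the default "" is then unreachable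
def pvTok (xs : List String) (n : Int) : String := (PySem.List.pyGet? xs n).getD ""
-- ' ' + mol_ + splt[0] + ' '*7 + mol_ + splt[1] + line[12:]
def pvRw1 (mol_ l : String) : String :=
  let splt := PySem.Str.split₀ l
  " " ++ mol_ ++ pvTok splt 0 ++ "       " ++ mol_ ++ pvTok splt 1 ++ PySem.Str.slice l (some 12) none
-- line[:9] + mol_ + splt[1] + line[11:]
def pvRw2 (mol_ l : String) : String :=
  let splt := PySem.Str.split₀ l
  PySem.Str.slice l none (some 9) ++ mol_ ++ pvTok splt 1 ++ PySem.Str.slice l (some 11) none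
-- "[ defaults ]" in line or "[ system ]" in line or "[ molecules ]" in line
def pvNoWrite (l : String) : Bool :=
  PySem.Str.isIn "[ defaults ]" l || PySem.Str.isIn "[ system ]" l || PySem.Str.isIn "[ molecules ]" l
-- 'H' not in splt[4].upper()
def pvHeavy (splt : List String) : Bool := ! PySem.Str.isIn "H" (PySem.Str.upper (pvTok splt 4))

-- per-line block transformers: each names one of the three statement blocks of A's loop body
-- block 1: the "[ atomtypes ]" if/elif chain — new atomtypes flag and (possibly rewritten) line
def pvF1 (mol_ : String) (atomtypes : Bool) (line : String) : Bool × String :=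
  if PySem.Str.isIn "[ atomtypes ]" line then (true, line)
  else if atomtypes then
    if pvBlank line then (false, line)
    else if ! pvComment line then (true, pvRw1 mol_ line)
    else (true, line)
  else (atomtypes, line)

-- block 2: the "[ atoms ]" if/elif chain — new atoms flag, new line, and the element appended to hvy (if any)
def pvF2 (mol_ : String) (atoms : Bool) (line : String) : Bool × String × Option String :=
  if PySem.Str.isIn "[ atoms ]" line then (true, line, none)
  else if atoms then
    if pvBlank line || line == "[ bonds ]" then (false, line, none)
    else if ! pvComment line then
      (true, pvRw2 mol_ line,
       if pvHeavy (PySem.Str.split₀ line) then some (pvTok (PySem.Str.split₀ line) 0) else none)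
    else (true, line, none)
  else (atoms, line, none)

-- block 3: the two notwrite updates
def pvF3 (notwrite : Bool) (line : String) : Bool :=
  let notwrite := if pvNoWrite line then true else notwrite
  if notwrite && pvBlank line then false else notwrite

-- A: one fold over the lines, state (atomtypes, atoms, notwrite, itp_str, hvy); the loop body is
-- block 1, then block 2 (on the updated line), then block 3, then the conditional append to itp_str
def pvStepA (mol_ : String) (st : Bool × Bool × Bool × String × List String) (line : String) :
    Bool × Bool × Bool × String × List String :=
  match st with
  | (atomtypes, atoms, notwrite, acc, hvy) =>
    match pvF1 mol_ atomtypes line with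
    | (atomtypes, line) =>
      match pvF2 mol_ atoms line with
      | (atoms, line, app) =>
        let notwrite := pvF3 notwrite line
        let acc := if notwrite == false then acc ++ line ++ "\n" else acc
        (atomtypes, atoms, notwrite, acc, hvy ++ app.toList)

def cleanItp_py (itp : String) (mol : String) : String × List String :=
  let mol_ := mol ++ "_"
  let lines := PySem.List.slice (PySem.Str.splitlines itp) (some 1) none   -- itp.splitlines()[1:]
  match lines.foldl (pvStepA mol_) (false, false, false, "", []) with
  | (_, _, _, itp_str, hvy) => (itp_str, hvy)

-- ===== PORT B =====
-- pass 1: atomtypes-section rewriting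
def pvPass1 (mol_ : String) (inside : Bool) : List String → List String
  | [] => []
  | l :: rest =>
    if PySem.Str.isIn "[ atomtypes ]" l then l :: pvPass1 mol_ true rest
    else if inside then
      if pvBlank l then l :: pvPass1 mol_ false rest
      else if ! pvComment l then pvRw1 mol_ l :: pvPass1 mol_ true rest
      else l :: pvPass1 mol_ true rest
    else l :: pvPass1 mol_ inside rest

-- pass 2: atoms-section rewriting + heavy-atom collection
def pvPass2 (mol_ : String) (inside : Bool) : List String → List String × List String
  | [] => ([], [])
  | l :: rest =>
    if PySem.Str.isIn "[ atoms ]" l then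
      let r := pvPass2 mol_ true rest; (l :: r.1, r.2)
    else if inside then
      if pvBlank l || l == "[ bonds ]" then
        let r := pvPass2 mol_ false rest; (l :: r.1, r.2)
      else if ! pvComment l then
        let splt := PySem.Str.split₀ l
        let r := pvPass2 mol_ true rest
        if pvHeavy splt then (pvRw2 mol_ l :: r.1, pvTok splt 0 :: r.2)
        else (pvRw2 mol_ l :: r.1, r.2)
      else
        let r := pvPass2 mol_ true rest; (l :: r.1, r.2)
    else
      let r := pvPass2 mol_ inside rest; (l :: r.1, r.2)

-- pass 3: drop the defaults/system/molecules blocks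
def pvPass3 (skipping : Bool) : List String → List String
  | [] => []
  | l :: rest =>
    let skipping := if pvNoWrite l then true else skipping
    let skipping := if skipping && pvBlank l then false else skipping
    if skipping then pvPass3 skipping rest else l :: pvPass3 skipping rest

def cleanItp_py_alt (itp : String) (mol : String) : String × List String :=
  let mol_ := mol ++ "_"
  let lines := PySem.List.slice (PySem.Str.splitlines itp) (some 1) none   -- itp.splitlines()[1:]
  let p2 := pvPass2 mol_ false (pvPass1 mol_ false lines)
  (PySem.Str.join "" ((pvPass3 false p2.1).map (fun l => l ++ "\n")), p2.2)

-- ===== PRECONDITION & SPEC =====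
-- closed-form picture of which line is inside which section, used only by Pre_:
-- the i-th relevant line (0-based, after the dropped first line)
def pvLineAt (lines : List String) (i : Nat) : String := lines.getD i ""
-- the atomtypes flag holds at line i iff some earlier line contains the atomtypes header
-- with no blank line strictly in between (a later header simply re-establishes the flag)
def pvAtFlag (lines : List String) (i : Nat) : Bool :=
  (List.range i).any (fun j =>
    PySem.Str.isIn "[ atomtypes ]" (pvLineAt lines j) &&
    (List.range i).all (fun k => decide (k ≤ j) || ! pvBlank (pvLineAt lines k)))
-- line i as the atoms-section logic of A sees it (after the possible atomtypes rewrite)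
def pvRwAt (mol_ : String) (lines : List String) (i : Nat) : String :=
  let l := pvLineAt lines i
  if pvAtFlag lines i && ! PySem.Str.isIn "[ atomtypes ]" l && ! pvBlank l && ! pvComment l
  then pvRw1 mol_ l else l
-- the atoms flag at line i: some earlier (possibly rewritten) line contains the atoms header,
-- with no subsequent non-header line that is blank or exactly "[ bonds ]"
def pvAtomsFlag (mol_ : String) (lines : List String) (i : Nat) : Bool :=
  (List.range i).any (fun j =>
    PySem.Str.isIn "[ atoms ]" (pvRwAt mol_ lines j) &&
    (List.range i).all (fun k => decide (k ≤ j) ||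
      PySem.Str.isIn "[ atoms ]" (pvRwAt mol_ lines k) ||
      ! (pvBlank (pvRwAt mol_ lines k) || pvRwAt mol_ lines k == "[ bonds ]")))

-- Pre_ excludes exactly the inputs on which the Python A raises IndexError: a non-blank non-comment
-- data line inside an atomtypes section with fewer than 2 whitespace fields, or whose (possibly
-- atomtypes-rewritten) form lies inside an atoms section (not blank, not "[ bonds ]", not a comment)
-- with fewer than 5 fields.
def Pre_cleanItp_py (itp : String) (mol : String) : Prop :=
  ∀ i ∈ List.range (PySem.List.slice (PySem.Str.splitlines itp) (some 1) none).length,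
    let lines := PySem.List.slice (PySem.Str.splitlines itp) (some 1) none
    let mol_ := mol ++ "_"
    ((pvAtFlag lines i && ! PySem.Str.isIn "[ atomtypes ]" (pvLineAt lines i) &&
      ! pvBlank (pvLineAt lines i) && ! pvComment (pvLineAt lines i)) = true →
      2 ≤ (PySem.Str.split₀ (pvLineAt lines i)).length) ∧
    ((pvAtomsFlag mol_ lines i && ! PySem.Str.isIn "[ atoms ]" (pvRwAt mol_ lines i) &&
      ! (pvBlank (pvRwAt mol_ lines i) || pvRwAt mol_ lines i == "[ bonds ]") &&
      ! pvComment (pvRwAt mol_ lines i)) = true →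
      5 ≤ (PySem.Str.split₀ (pvRwAt mol_ lines i)).length)

instance (itp : String) (mol : String) : Decidable (Pre_cleanItp_py itp mol) := by
  unfold Pre_cleanItp_py; infer_instance

def pvWitness_cleanItp_py : String × String :=
  ("x\n[ atoms ]\n1 CA1 1 MOL CA 1 0.0 12.0\n", "MOL")

def Spec_cleanItp_py (itp : String) (mol : String) (out : String × List String) : Prop := out = cleanItp_py_alt itp mol
instance (itp : String) (mol : String) (out : String × List String) : Decidable (Spec_cleanItp_py itp mol out) := by unfold Spec_cleanItp_py; infer_instance

-- ===== CLAIM (what is proved, stated in full; the proofs are below) =====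
def Claim_equal_cleanItp_py : Prop := ∀ (itp : String) (mol : String), Dom_cleanItp_py itp mol → Pre_cleanItp_py itp mol → Spec_cleanItp_py itp mol (cleanItp_py itp mol)

-- ===== LEMMAS AND PROOFS =====

theorem pv_join_cons (x : String) (xs : List String) :
    PySem.Str.join "" (x :: xs) = x ++ PySem.Str.join "" xs := by
  cases xs with
  | nil => simp [PySem.Str.join, PySem.Chars.join, List.intercalate]
  | cons y ys => simp [PySem.Str.join, PySem.Chars.join, List.intercalate, String.ofList_append]

theorem pvStepA_eq (mol_ : String) (t a n : Bool) (acc : String) (h : List String) (l : String) :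
    pvStepA mol_ (t, a, n, acc, h) l =
      ((pvF1 mol_ t l).1, (pvF2 mol_ a (pvF1 mol_ t l).2).1,
       pvF3 n (pvF2 mol_ a (pvF1 mol_ t l).2).2.1,
       (if pvF3 n (pvF2 mol_ a (pvF1 mol_ t l).2).2.1 == false
        then acc ++ (pvF2 mol_ a (pvF1 mol_ t l).2).2.1 ++ "\n" else acc),
       h ++ ((pvF2 mol_ a (pvF1 mol_ t l).2).2.2).toList) := by
  rcases hf1 : pvF1 mol_ t l with ⟨t1, l1⟩
  rcases hf2 : pvF2 mol_ a l1 with ⟨a2, l2, o2⟩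
  simp [pvStepA, hf1, hf2]

theorem pvPass1_cons (mol_ : String) (t : Bool) (l : String) (rest : List String) :
    pvPass1 mol_ t (l :: rest) = (pvF1 mol_ t l).2 :: pvPass1 mol_ (pvF1 mol_ t l).1 rest := by
  simp only [pvPass1, pvF1]
  split_ifs <;> rfl

theorem pvPass2_cons (mol_ : String) (a : Bool) (l : String) (rest : List String) :
    pvPass2 mol_ a (l :: rest) =
      ((pvF2 mol_ a l).2.1 :: (pvPass2 mol_ (pvF2 mol_ a l).1 rest).1,
       ((pvF2 mol_ a l).2.2).toList ++ (pvPass2 mol_ (pvF2 mol_ a l).1 rest).2) := by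
  simp only [pvPass2, pvF2]
  split_ifs <;> simp

theorem pvPass3_cons (n : Bool) (l : String) (rest : List String) :
    pvPass3 n (l :: rest) = (if pvF3 n l then [] else [l]) ++ pvPass3 (pvF3 n l) rest := by
  simp only [pvPass3, pvF3]
  split_ifs <;> simp_all

theorem pv_key (mol_ : String) : ∀ (ls : List String) (t a n : Bool) (acc : String) (h : List String),
    (ls.foldl (pvStepA mol_) (t, a, n, acc, h)).2.2.2 =
      (acc ++ PySem.Str.join "" ((pvPass3 n (pvPass2 mol_ a (pvPass1 mol_ t ls)).1).map (fun l => l ++ "\n")),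
       h ++ (pvPass2 mol_ a (pvPass1 mol_ t ls)).2) := by
  intro ls
  induction ls with
  | nil => intro t a n acc h; simp [pvPass1, pvPass2, pvPass3, PySem.Str.join, PySem.Chars.join, List.intercalate]
  | cons l rest ih =>
    intro t a n acc h
    rw [List.foldl_cons, pvStepA_eq, ih, pvPass1_cons, pvPass2_cons, pvPass3_cons]
    cases hF3 : pvF3 n (pvF2 mol_ a (pvF1 mol_ t l).2).2.1 <;>
      simp [pv_join_cons, String.append_assoc]

-- ===== VERDICT (by name: the statement is the Claim_ definition above) =====
theorem cleanItp_py_spec : Claim_equal_cleanItp_py := by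
  intro itp mol _ _
  unfold Spec_cleanItp_py cleanItp_py cleanItp_py_alt
  dsimp only
  have hk := pv_key (mol ++ "_") (PySem.List.slice (PySem.Str.splitlines itp) (some 1) none)
    false false false "" []
  rcases hfold : (PySem.List.slice (PySem.Str.splitlines itp) (some 1) none).foldl
      (pvStepA (mol ++ "_")) (false, false, false, "", []) with ⟨t, a, n, str, hv⟩
  rw [hfold] at hk
  simpa [String.empty_append, Prod.ext_iff] using hk
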